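-- pv_equiv track=rewrite | github.com/T300Y/encyrptio | Encyrption_SDD_AT1/main.py | arc_v_c
-- ===== SOURCE A (Python) =====
-- def arc_v_c(message_arr, n):
--     vowels = set("aeiouAEIOU")
--     consonants_list = []
--     vowels_list = [i for i, char in enumerate(message_arr) if char in vowels]
--     consonants_list_t = []
--     for i in range(0, len(message_arr)):
--         if message_arr[i].isalpha():
--             if message_arr[i] not in vowels:
--                 consonants_list_t.append(i)
--         else:
--             if consonants_list_t:
--                 consonants_list.append(consonants_list_t)
--                 consonants_list_t = []
--     consonants_list.append(consonants_list_t)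
--     vowels_list = vowels_list[-1:] + vowels_list[:-1]
--     for i in range(len(consonants_list)):
--         if len(consonants_list[i]) > 1:
--             consonants_list[i] = consonants_list[i][1:] + [consonants_list[i][0]]
--     message_copy = message_arr.copy()
--     for i in range(len(message_arr)):
--         if message_arr[i].isalpha() == False:
--             continue
--         if message_copy[i] in ["a","e","i","o","u","A","E","I","O","U"] and len(vowels_list) > 0:
--             message_arr[i] = message_copy[vowels_list[0]]
--             vowels_list.remove(vowels_list[0])
--         elif len(consonants_list) > 0 and message_copy[i].lower() not in ["a","e","i","o","u"]:
--             message_arr[i] = message_copy[consonants_list[0][0]]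
--             consonants_list[0].remove(consonants_list[0][0])
--             if not consonants_list[0]:
--                 consonants_list.remove(consonants_list[0])
--     message = ''.join([item for item in message_arr])
--     return message
-- ===== SOURCE B (Python) =====
-- def arc_v_c(message_arr, n):
--     vowels = set("aeiouAEIOU")
--     snap = list(message_arr)
--     N = len(snap)
--     # vowels: rotate the vowel characters right by one, scatter back
--     vpos = [i for i, c in enumerate(snap) if c in vowels]
--     vch = [snap[p] for p in vpos]
--     for p, c in zip(vpos, vch[-1:] + vch[:-1]):
--         message_arr[p] = c
--     # consonant runs: maximal alphabetic blocks (vowels do not split a run),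
--     # found by span-advancing; each run's consonant chars rotate left by one
--     groups = []
--     i = 0
--     while i < N:
--         if not snap[i].isalpha():
--             i += 1
--             continue
--         j = i
--         while j < N and snap[j].isalpha():
--             j += 1
--         g = [k for k in range(i, j) if snap[k] not in vowels]
--         if g:
--             groups.append(g)
--         i = j
--     for g in groups:
--         cs = [snap[p] for p in g]
--         for p, c in zip(g, cs[1:] + cs[:1]):
--             message_arr[p] = c
--     return ''.join(message_arr)
-- ===== Notes on version B (the rewrite author's own statement) =====
-- stated objective: simpler
-- what changed: B replaces A's single interleaved queue-consuming rewrite loop (which pops positions from a rotated vowel-index list and from a list of consonant-run index lists via O(n) list.remove calls while walking the text) by direct scatter passes: rotate the vowel characters right by one and write them back at the vowel positions, then find each maximal alphabetic run by span-advancing and write its consonant characters rotated left by one back at the run's consonant positions.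
import Mathlib
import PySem

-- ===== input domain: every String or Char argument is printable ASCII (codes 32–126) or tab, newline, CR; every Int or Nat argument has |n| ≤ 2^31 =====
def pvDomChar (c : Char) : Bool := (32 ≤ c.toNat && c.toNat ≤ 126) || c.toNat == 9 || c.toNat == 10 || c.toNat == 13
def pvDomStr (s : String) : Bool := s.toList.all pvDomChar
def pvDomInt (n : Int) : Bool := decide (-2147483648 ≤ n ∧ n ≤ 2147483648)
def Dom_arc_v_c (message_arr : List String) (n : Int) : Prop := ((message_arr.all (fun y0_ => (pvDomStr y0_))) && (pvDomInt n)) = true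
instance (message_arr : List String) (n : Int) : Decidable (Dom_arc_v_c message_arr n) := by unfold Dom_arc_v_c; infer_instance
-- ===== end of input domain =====

-- B rewrites A's interleaved queue-consuming fill loop as plain scatter passes (rotate vowel chars
-- right; rotate each alphabetic run's consonant chars left), for simplicity; A and B both mutate the
-- Python list argument in place the same way, the equivalence below is about the returned string.

def pvV10 : List String := ["a", "e", "i", "o", "u", "A", "E", "I", "O", "U"]
def pvLow5 : List String := ["a", "e", "i", "o", "u"]

-- ===== PORT A =====
def arc_v_c (message_arr : List String) (n : Int) : String :=
  let vowels : PySem.Set String := PySem.Set.ofList pvV10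
  -- vowels_list = [i for i, char in enumerate(message_arr) if char in vowels]
  let vowels_list : List Nat :=
    (List.range message_arr.length).foldl
      (fun acc i => if PySem.Set.contains vowels (message_arr.getD i "") then acc ++ [i] else acc) []
  -- consonant-run scan building (consonants_list, consonants_list_t)
  let scan :=
    (List.range message_arr.length).foldl
      (fun (st : List (List Nat) × List Nat) i =>
        if PySem.Str.strIsalpha (message_arr.getD i "") then
          if PySem.Set.contains vowels (message_arr.getD i "") then st
          else (st.1, st.2 ++ [i])
        else if st.2 ≠ [] then (st.1 ++ [st.2], []) else st)
      ([], [])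
  let consonants_list := scan.1 ++ [scan.2]
  -- vowels_list = vowels_list[-1:] + vowels_list[:-1]
  let vowels_list := vowels_list.drop (vowels_list.length - 1) ++ vowels_list.take (vowels_list.length - 1)
  -- in-place elementwise rotation loop over consonants_list
  let consonants_list := consonants_list.map (fun g => if g.length > 1 then g.drop 1 ++ g.take 1 else g)
  let message_copy := message_arr
  -- the final fill loop; `remove` of the head element of a list is its tail
  let final :=
    (List.range message_arr.length).foldl
      (fun (st : List String × List Nat × List (List Nat)) i =>
        if PySem.Str.strIsalpha (st.1.getD i "") = false then st
        else if message_copy.getD i "" ∈ pvV10 ∧ 0 < st.2.1.length then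
          (st.1.set i (message_copy.getD st.2.1.headI ""), st.2.1.tail, st.2.2)
        else if 0 < st.2.2.length ∧ PySem.Str.lower (message_copy.getD i "") ∉ pvLow5 then
          (st.1.set i (message_copy.getD st.2.2.headI.headI ""), st.2.1,
            if st.2.2.headI.tail = [] then st.2.2.tail else st.2.2.headI.tail :: st.2.2.tail)
        else st)
      (message_arr, vowels_list, consonants_list)
  PySem.Str.join "" final.1

-- ===== PORT B =====
-- span-advancing run finder of Source B: skip a non-alphabetic char, or take a whole maximal
-- alphabetic block at once and keep its consonant positions (if any) as one group
def pvAltRuns (snap : List String) (i : Nat) (l : List String) : List (List Nat) :=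
  match l with
  | [] => []
  | c :: rest =>
    if PySem.Str.strIsalpha c then
      let blk := rest.takeWhile (fun s => PySem.Str.strIsalpha s)
      let g := (List.range' i (blk.length + 1)).filter
                 (fun k => !(PySem.Set.contains (PySem.Set.ofList pvV10) (snap.getD k "")))
      (if g = [] then [] else [g]) ++ pvAltRuns snap (i + blk.length + 1) (rest.drop blk.length)
    else pvAltRuns snap (i + 1) rest
termination_by l.length
decreasing_by
  · simp
  · simp

def arc_v_c_alt (message_arr : List String) (n : Int) : String :=
  let vowels : PySem.Set String := PySem.Set.ofList pvV10
  let snap := message_arr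
  -- vowel positions and their chars, rotated right by one, scattered back
  let vpos := (List.range snap.length).filter (fun i => PySem.Set.contains vowels (snap.getD i ""))
  let vch := vpos.map (fun p => snap.getD p "")
  let msg1 := (vpos.zip (vch.drop (vch.length - 1) ++ vch.take (vch.length - 1))).foldl
                (fun m pc => m.set pc.1 pc.2) message_arr
  -- each run's consonant chars rotated left by one, scattered back
  let groups := pvAltRuns snap 0 snap
  let msg2 := groups.foldl
      (fun m g =>
        let cs := g.map (fun p => snap.getD p "")
        (g.zip (cs.drop 1 ++ cs.take 1)).foldl (fun m pc => m.set pc.1 pc.2) m) msg1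
  PySem.Str.join "" msg2

-- ===== PRECONDITION & SPEC =====
def Spec_arc_v_c (message_arr : List String) (n : Int) (out : String) : Prop := out = arc_v_c_alt message_arr n
instance (message_arr : List String) (n : Int) (out : String) : Decidable (Spec_arc_v_c message_arr n out) := by unfold Spec_arc_v_c; infer_instance

-- ===== CLAIM (what is proved, stated in full; the proofs are below) =====
def Claim_equal_arc_v_c : Prop := ∀ (message_arr : List String) (n : Int), Dom_arc_v_c message_arr n → Spec_arc_v_c message_arr n (arc_v_c message_arr n)

-- ===== LEMMAS AND PROOFS =====

-- abbreviations for the joint analysis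
def pvD (copy : List String) (i : Nat) : String := copy.getD i ""
def pvIsV (copy : List String) (i : Nat) : Bool := pvV10.contains (copy.getD i "")
def pvIsAl (copy : List String) (i : Nat) : Bool := PySem.Str.strIsalpha (copy.getD i "")
def pvIsC (copy : List String) (i : Nat) : Bool := pvIsAl copy i && !(pvIsV copy i)

def pvRot (g : List Nat) : List Nat := g.drop 1 ++ g.take 1

-- scatter: apply a list of (position, char) writes
def pvSc (m : List String) (l : List (Nat × String)) : List String :=
  l.foldl (fun m pc => m.set pc.1 pc.2) m

-- the write sequence performed by A's final loop, with vq / cq the pending vowel-source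
-- positions and (flattened) consonant-source positions
def pvWr (copy : List String) : List Nat → List Nat → List Nat → List (Nat × String)
  | [], _, _ => []
  | i :: ps, vq, cq =>
    if pvIsV copy i then (i, pvD copy vq.headI) :: pvWr copy ps vq.tail cq
    else if pvIsC copy i then (i, pvD copy cq.headI) :: pvWr copy ps vq cq.tail
    else pvWr copy ps vq cq

-- all groups nonempty except possibly the last
def pvGG : List (List Nat) → Prop
  | [] => True
  | [_] => True
  | g :: gs => g ≠ [] ∧ pvGG gs

def pvScanF (copy : List String) (st : List (List Nat) × List Nat) (i : Nat) :
    List (List Nat) × List Nat :=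
  if PySem.Str.strIsalpha (copy.getD i "") then
    if PySem.Set.contains (PySem.Set.ofList pvV10) (copy.getD i "") then st
    else (st.1, st.2 ++ [i])
  else if st.2 ≠ [] then (st.1 ++ [st.2], []) else st

def pvFinF (copy : List String) (st : List String × List Nat × List (List Nat)) (i : Nat) :
    List String × List Nat × List (List Nat) :=
  if PySem.Str.strIsalpha (st.1.getD i "") = false then st
  else if copy.getD i "" ∈ pvV10 ∧ 0 < st.2.1.length then
    (st.1.set i (copy.getD st.2.1.headI ""), st.2.1.tail, st.2.2)
  else if 0 < st.2.2.length ∧ PySem.Str.lower (copy.getD i "") ∉ pvLow5 then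
    (st.1.set i (copy.getD st.2.2.headI.headI ""), st.2.1,
      if st.2.2.headI.tail = [] then st.2.2.tail else st.2.2.headI.tail :: st.2.2.tail)
  else st

-- basic bridges
lemma pvOf : PySem.Set.ofList pvV10 = pvV10 := by decide

lemma pvContains_eq (c : String) :
    PySem.Set.contains (PySem.Set.ofList pvV10) c = pvV10.contains c := by
  rw [pvOf]; rfl

lemma pvV_alpha : ∀ c ∈ pvV10, PySem.Str.strIsalpha c = true := by decide

lemma pvIsV_alpha {copy : List String} {i : Nat} (h : pvIsV copy i = true) :
    pvIsAl copy i = true := by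
  have := pvV_alpha (copy.getD i "") (by simpa [pvIsV] using h)
  simpa [pvIsAl]

-- Python ".lower() not in [a,e,i,o,u]" agrees with "not in vowels" on alphabetic strings
lemma pvOfNatToNat (n : Nat) (h : n < 55296) : (Char.ofNat n).toNat = n := by
  unfold Char.ofNat
  split
  · rfl
  · next hv => exact absurd (Or.inl (by omega)) hv

lemma pvCharLower (ch : Char) (h : PySem.Chars.isalpha ch = true) :
    (PySem.Chars.lowerChar ch ∈ ['a','e','i','o','u']) ↔ ch ∈ ['a','e','i','o','u','A','E','I','O','U'] := by
  simp only [PySem.Chars.isalpha, Bool.or_eq_true] at h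
  have hval : ∀ (a b : Char), a = b ↔ a.toNat = b.toNat := by
    intro a b
    constructor
    · rintro rfl; rfl
    · intro hv; exact Char.ext (UInt32.toNat_inj.mp hv)
  have la : 'a'.toNat = 97 := rfl
  have le : 'e'.toNat = 101 := rfl
  have li : 'i'.toNat = 105 := rfl
  have lo : 'o'.toNat = 111 := rfl
  have lu : 'u'.toNat = 117 := rfl
  have lA : 'A'.toNat = 65 := rfl
  have lE : 'E'.toNat = 69 := rfl
  have lI : 'I'.toNat = 73 := rfl
  have lO : 'O'.toNat = 79 := rfl
  have lU : 'U'.toNat = 85 := rfl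
  rcases h with h | h
  · simp only [PySem.Chars.isupper, Bool.and_eq_true, decide_eq_true_eq] at h
    obtain ⟨h1, h2⟩ := h
    have h1' : 65 ≤ ch.toNat := h1
    have h2' : ch.toNat ≤ 90 := h2
    have hl : PySem.Chars.lowerChar ch = Char.ofNat (ch.toNat + 32) := by
      simp [PySem.Chars.lowerChar, PySem.Chars.isupper, h1, h2]
    have hofval : (Char.ofNat (ch.toNat + 32)).toNat = ch.toNat + 32 := by
      apply pvOfNatToNat; omega
    rw [hl]
    simp only [List.mem_cons, List.not_mem_nil, or_false, hval, hofval, la, le, li, lo, lu, lA, lE, lI, lO, lU]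
    omega
  · simp only [PySem.Chars.islower, Bool.and_eq_true, decide_eq_true_eq] at h
    obtain ⟨h1, h2⟩ := h
    have h1' : 97 ≤ ch.toNat := h1
    have h2' : ch.toNat ≤ 122 := h2
    have hl : PySem.Chars.lowerChar ch = ch := by
      simp only [PySem.Chars.lowerChar, PySem.Chars.isupper]
      have hne : ¬ (decide ('A' ≤ ch) && decide (ch ≤ 'Z')) = true := by
        simp only [Bool.and_eq_true, decide_eq_true_eq]
        rintro ⟨_, hb⟩
        have : ch.toNat ≤ 90 := hb
        omega
      simp [hne]
    rw [hl]
    simp only [List.mem_cons, List.not_mem_nil, or_false, hval, la, le, li, lo, lu, lA, lE, lI, lO, lU]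
    omega

lemma pvMemToList (s : String) (L : List String) : s ∈ L ↔ s.toList ∈ L.map String.toList := by
  rw [List.mem_map_of_injective (fun a b => String.toList_inj.mp)]

lemma pvLowerMem (c : String) (h : PySem.Str.strIsalpha c = true) :
    PySem.Str.lower c ∈ pvLow5 ↔ c ∈ pvV10 := by
  rw [pvMemToList _ pvLow5, pvMemToList _ pvV10]
  have hl : (PySem.Str.lower c).toList = (c.toList).map PySem.Chars.lowerChar := by
    simp [pysem, PySem.Chars.lower]
  rw [hl]
  have hmap5 : pvLow5.map String.toList = [['a'],['e'],['i'],['o'],['u']] := by decide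
  have hmap10 : pvV10.map String.toList = [['a'],['e'],['i'],['o'],['u'],['A'],['E'],['I'],['O'],['U']] := by decide
  rw [hmap5, hmap10]
  simp only [PySem.Str.strIsalpha] at h
  rcases hc : c.toList with _ | ⟨ch, _ | ⟨ch2, t⟩⟩
  · rw [hc] at h; simp [PySem.Chars.strIsalpha] at h
  · rw [hc] at h
    simp only [PySem.Chars.strIsalpha, Bool.and_eq_true, List.all_cons, List.all_nil] at h
    have := pvCharLower ch (by simpa using h.2)
    simpa using this
  · simp

-- small structural lemmas
lemma pvSc_append (m : List String) (l1 l2 : List (Nat × String)) :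
    pvSc m (l1 ++ l2) = pvSc (pvSc m l1) l2 := by
  simp [pvSc]

lemma pvSc_perm : ∀ {l1 l2 : List (Nat × String)}, l1.Perm l2 →
    (l1.map Prod.fst).Nodup → ∀ m, pvSc m l1 = pvSc m l2 := by
  intro l1 l2 h
  induction h with
  | nil => intro _ _; rfl
  | cons x h ih =>
      intro hn m
      simp only [List.map_cons, List.nodup_cons] at hn
      exact ih hn.2 (m.set x.1 x.2)
  | swap x y l =>
      intro hn m
      simp only [List.map_cons, List.nodup_cons, List.mem_cons] at hn
      have hxy : y.1 ≠ x.1 := fun h => hn.1 (Or.inl h)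
      show pvSc ((m.set y.1 y.2).set x.1 x.2) l = pvSc ((m.set x.1 x.2).set y.1 y.2) l
      rw [List.set_comm y.2 x.2 hxy]
  | trans h1 h2 ih1 ih2 =>
      intro hn m
      rw [ih1 hn m]
      exact ih2 (((h1.map Prod.fst).nodup_iff).mp hn) m

lemma pvGG_tail {g : List Nat} {gs : List (List Nat)} (h : pvGG (g :: gs)) : pvGG gs := by
  cases gs with
  | nil => trivial
  | cons g2 gs2 => exact h.2

lemma pvGG_cons_of_ne {g : List Nat} {gs : List (List Nat)} (hg : g ≠ []) (h : pvGG gs) :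
    pvGG (g :: gs) := by
  cases gs with
  | nil => trivial
  | cons g2 gs2 => exact ⟨hg, h⟩

lemma pvGG_append_singleton (gs : List (List Nat)) (t : List Nat) (h : ∀ g ∈ gs, g ≠ []) :
    pvGG (gs ++ [t]) := by
  induction gs with
  | nil => trivial
  | cons g gs ih =>
      exact pvGG_cons_of_ne (h g (by simp)) (ih (fun g hg => h g (by simp [hg])))

lemma pvRot_length (g : List Nat) : (pvRot g).length = g.length := by
  simp [pvRot]; omega

lemma pvRot_ne {g : List Nat} (h : g ≠ []) : pvRot g ≠ [] := by
  intro hc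
  have := congrArg List.length hc
  rw [pvRot_length] at this
  exact h (List.length_eq_zero_iff.mp this)

lemma pvRot_if (g : List Nat) : (if g.length > 1 then g.drop 1 ++ g.take 1 else g) = pvRot g := by
  by_cases h : g.length > 1
  · simp [h, pvRot]
  · rcases g with _ | ⟨a, _ | ⟨b, t⟩⟩ <;> simp_all [pvRot]

lemma pvGG_map_rot : ∀ {l : List (List Nat)}, pvGG l → pvGG (l.map pvRot) := by
  intro l
  induction l with
  | nil => intro _; trivial
  | cons g gs ih =>
      intro h
      cases gs with
      | nil => trivial
      | cons g2 gs2 => exact ⟨pvRot_ne h.1, ih h.2⟩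

lemma pvFlattenRot_len : ∀ (l : List (List Nat)),
    ((l.map pvRot).flatten).length = (l.flatten).length := by
  intro l
  induction l with
  | nil => rfl
  | cons g gs ih => simp [pvRot_length, ih]

lemma pvWr_map_fst (copy : List String) : ∀ (ps : List Nat) (vq cq : List Nat),
    (pvWr copy ps vq cq).map Prod.fst = ps.filter (fun i => pvIsV copy i || pvIsC copy i) := by
  intro ps
  induction ps with
  | nil => intro vq cq; rfl
  | cons i ps ih =>
      intro vq cq
      by_cases hv : pvIsV copy i
      · simp [pvWr, hv, List.filter, ih]
      · by_cases hc : pvIsC copy i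
        · simp [pvWr, hv, hc, List.filter, ih]
        · simp [pvWr, hv, hc, List.filter, ih]

lemma pvWr_perm (copy : List String) : ∀ (ps : List Nat) (vq cq : List Nat),
    vq.length = ps.countP (pvIsV copy) → cq.length = ps.countP (pvIsC copy) →
    (pvWr copy ps vq cq).Perm
      (((ps.filter (pvIsV copy)).zip (vq.map (pvD copy))) ++
       ((ps.filter (pvIsC copy)).zip (cq.map (pvD copy)))) := by
  intro ps
  induction ps with
  | nil => intro vq cq _ _; simp [pvWr]
  | cons i ps ih =>
      intro vq cq hv hc
      by_cases hiv : pvIsV copy i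
      · have hvc : ¬ pvIsC copy i = true := by simp [pvIsC, hiv]
        rw [List.countP_cons_of_pos (pa := by simpa using hiv)] at hv
        rw [List.countP_cons_of_neg (pa := by simpa using hvc)] at hc
        rcases vq with _ | ⟨v0, vt⟩
        · simp at hv
        · simp only [pvWr, hiv, if_pos]
          have hh : (v0 :: vt).headI = v0 := rfl
          rw [hh]
          have : ((i :: ps).filter (pvIsV copy)) = i :: ps.filter (pvIsV copy) := by
            simp [List.filter, hiv]
          rw [this, List.filter_cons_of_neg (by simpa using hvc)]
          simp only [List.map_cons, List.zip_cons_cons, List.cons_append]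
          exact (ih vt cq (by simpa using hv) hc).cons _
      · by_cases hic : pvIsC copy i
        · rw [List.countP_cons_of_neg (pa := by simpa using hiv)] at hv
          rw [List.countP_cons_of_pos (pa := by simpa using hic)] at hc
          rcases cq with _ | ⟨c0, ct⟩
          · simp at hc
          · simp only [pvWr, hiv, hic, if_neg, if_pos, Bool.false_eq_true, not_false_iff]
            have hh : (c0 :: ct).headI = c0 := rfl
            rw [hh]
            rw [List.filter_cons_of_neg (by simpa using hiv),
                List.filter_cons_of_pos (by simpa using hic)]
            simp only [List.map_cons, List.zip_cons_cons]
            refine ((ih vq ct hv (by simpa using hc)).cons _).trans ?_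
            exact (List.perm_middle).symm
        · rw [List.countP_cons_of_neg (pa := by simpa using hiv)] at hv
          rw [List.countP_cons_of_neg (pa := by simpa using hic)] at hc
          simp only [pvWr, hiv, hic, if_neg, Bool.false_eq_true, not_false_iff]
          rw [List.filter_cons_of_neg (by simpa using hiv),
              List.filter_cons_of_neg (by simpa using hic)]
          exact ih vq cq hv hc

lemma pvMemV_iff (copy : List String) (i : Nat) :
    copy.getD i "" ∈ pvV10 ↔ pvIsV copy i = true := by
  simp [pvIsV]

lemma pvLoopA (copy : List String) : ∀ (ps : List Nat) (msg : List String) (vq : List Nat)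
    (cl : List (List Nat)),
    ps.Nodup →
    (∀ i ∈ ps, msg.getD i "" = copy.getD i "") →
    vq.length = ps.countP (pvIsV copy) →
    pvGG cl →
    cl.flatten.length = ps.countP (pvIsC copy) →
    (ps.foldl (pvFinF copy) (msg, vq, cl)).1 = pvSc msg (pvWr copy ps vq cl.flatten) := by
  intro ps
  induction ps with
  | nil => intro msg vq cl _ _ _ _ _; rfl
  | cons i ps ih =>
      intro msg vq cl hnd hinv hv hgg hc
      have hmsgi : msg.getD i "" = copy.getD i "" := hinv i (by simp)
      simp only [List.nodup_cons] at hnd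
      by_cases hal : pvIsAl copy i
      · by_cases hiv : pvIsV copy i
        · -- vowel step
          have hvc : ¬ pvIsC copy i = true := by simp [pvIsC, hiv]
          rw [List.countP_cons_of_pos (pa := by simpa using hiv)] at hv
          rw [List.countP_cons_of_neg (pa := by simpa using hvc)] at hc
          rcases vq with _ | ⟨v0, vt⟩
          · simp at hv
          · have hstep : pvFinF copy (msg, v0 :: vt, cl) i =
                (msg.set i (copy.getD v0 ""), vt, cl) := by
              simp only [pvFinF]
              rw [if_neg (by rw [hmsgi]; simpa [pvIsAl] using hal)]
              rw [if_pos ⟨(pvMemV_iff copy i).mpr hiv, by simp⟩]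
              rfl
            simp only [List.foldl_cons, hstep]
            have hwr : pvWr copy (i :: ps) (v0 :: vt) cl.flatten =
                (i, pvD copy v0) :: pvWr copy ps vt cl.flatten := by
              simp [pvWr, hiv]
            rw [hwr]
            have : pvSc msg ((i, pvD copy v0) :: pvWr copy ps vt cl.flatten) =
                pvSc (msg.set i (pvD copy v0)) (pvWr copy ps vt cl.flatten) := rfl
            rw [this]
            exact ih (msg.set i (pvD copy v0)) vt cl hnd.2
              (fun j hj => by
                rw [List.getD_eq_getElem?_getD, List.getElem?_set_ne (by rintro rfl; exact hnd.1 hj),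
                  ← List.getD_eq_getElem?_getD]
                exact hinv j (by simp [hj]))
              (by simpa using hv) hgg hc
        · -- consonant step
          have hic : pvIsC copy i = true := by simp [pvIsC, hal, hiv]
          rw [List.countP_cons_of_neg (pa := by simpa using hiv)] at hv
          rw [List.countP_cons_of_pos (pa := by simpa using hic)] at hc
          rcases cl with _ | ⟨g, cltail⟩
          · simp at hc
          · have hgne : g ≠ [] := by
              cases cltail with
              | nil => intro hg; rw [hg] at hc; simp at hc
              | cons g2 r => exact hgg.1
            rcases g with _ | ⟨a, gt⟩
            · exact absurd rfl hgne
            · have hstep : pvFinF copy (msg, vq, (a :: gt) :: cltail) i =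
                  (msg.set i (copy.getD a ""), vq,
                    if gt = [] then cltail else gt :: cltail) := by
                simp only [pvFinF]
                rw [if_neg (by rw [hmsgi]; simpa [pvIsAl] using hal)]
                rw [if_neg (by
                  rintro ⟨hmem, _⟩
                  exact hiv ((pvMemV_iff copy i).mp hmem))]
                rw [if_pos ⟨by simp, by
                  rw [pvLowerMem _ (by simpa [pvIsAl] using hal)]
                  intro hmem
                  exact hiv ((pvMemV_iff copy i).mp hmem)⟩]
                simp
              simp only [List.foldl_cons, hstep]
              have hflat : ((a :: gt) :: cltail).flatten = a :: (gt ++ cltail.flatten) := by simp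
              have hwr : pvWr copy (i :: ps) vq (((a :: gt) :: cltail).flatten) =
                  (i, pvD copy a) :: pvWr copy ps vq (gt ++ cltail.flatten) := by
                rw [hflat]; simp [pvWr, hiv, hic]
              rw [hwr]
              have hsc : pvSc msg ((i, pvD copy a) :: pvWr copy ps vq (gt ++ cltail.flatten)) =
                  pvSc (msg.set i (pvD copy a)) (pvWr copy ps vq (gt ++ cltail.flatten)) := rfl
              rw [hsc]
              have hflat2 : (if gt = [] then cltail else gt :: cltail).flatten
                  = gt ++ cltail.flatten := by
                by_cases hgt : gt = [] <;> simp [hgt]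
              have hgg2 : pvGG (if gt = [] then cltail else gt :: cltail) := by
                by_cases hgt : gt = []
                · rw [if_pos hgt]; exact pvGG_tail hgg
                · rw [if_neg hgt]; exact pvGG_cons_of_ne hgt (pvGG_tail hgg)
              have := ih (msg.set i (pvD copy a)) vq
                  (if gt = [] then cltail else gt :: cltail) hnd.2
                  (fun j hj => by
                    rw [List.getD_eq_getElem?_getD, List.getElem?_set_ne (by rintro rfl; exact hnd.1 hj),
                      ← List.getD_eq_getElem?_getD]
                    exact hinv j (by simp [hj]))
                  hv hgg2 (by
                    rw [hflat2]
                    have : ((a :: gt) :: cltail).flatten.length = (gt ++ cltail.flatten).length + 1 := by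
                      simp
                    omega)
              rw [hflat2] at this
              exact this
      · -- non-alphabetic: skip
        have hiv : ¬ pvIsV copy i = true := fun h => by
          rw [pvIsV_alpha h] at hal; exact hal rfl
        have hic : ¬ pvIsC copy i = true := by simp [pvIsC, hal]
        rw [List.countP_cons_of_neg (pa := by simpa using hiv)] at hv
        rw [List.countP_cons_of_neg (pa := by simpa using hic)] at hc
        have hstep : pvFinF copy (msg, vq, cl) i = (msg, vq, cl) := by
          simp only [pvFinF]
          rw [if_pos (by rw [hmsgi]; simpa [pvIsAl] using hal)]
        simp only [List.foldl_cons, hstep]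
        have hwr : pvWr copy (i :: ps) vq cl.flatten = pvWr copy ps vq cl.flatten := by
          simp [pvWr, hiv, hic]
        rw [hwr]
        exact ih msg vq cl hnd.2 (fun j hj => hinv j (by simp [hj])) hv hgg hc

lemma pvScanF_eq (copy : List String) (st : List (List Nat) × List Nat) (i : Nat) :
    pvScanF copy st i =
      if pvIsAl copy i then (if pvIsV copy i then st else (st.1, st.2 ++ [i]))
      else if st.2 ≠ [] then (st.1 ++ [st.2], []) else st := by
  simp [pvScanF, pvIsAl, pvIsV]

lemma pvScan_flatten (copy : List String) : ∀ (ps : List Nat) (cl : List (List Nat)) (t : List Nat),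
    (ps.foldl (pvScanF copy) (cl, t)).1.flatten ++ (ps.foldl (pvScanF copy) (cl, t)).2
      = cl.flatten ++ t ++ ps.filter (pvIsC copy) := by
  intro ps
  induction ps with
  | nil => intro cl t; simp
  | cons i ps ih =>
      intro cl t
      simp only [List.foldl_cons, pvScanF_eq]
      by_cases hal : pvIsAl copy i
      · by_cases hiv : pvIsV copy i
        · have hic : ¬ pvIsC copy i = true := by simp [pvIsC, hiv]
          rw [if_pos hal, if_pos hiv, List.filter_cons_of_neg (by simpa using hic), ih]
        · have hic : pvIsC copy i = true := by simp [pvIsC, hal, hiv]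
          rw [if_pos hal, if_neg hiv, List.filter_cons_of_pos (by simpa using hic)]
          rw [ih]
          simp
      · have hic : ¬ pvIsC copy i = true := by simp [pvIsC, hal]
        rw [if_neg hal, List.filter_cons_of_neg (by simpa using hic)]
        by_cases ht : t = []
        · rw [if_neg (by simp [ht]), ih]
        · rw [if_pos (by simp [ht]), ih]
          simp

lemma pvScan_block (copy : List String) : ∀ (ps : List Nat) (cl : List (List Nat)) (t : List Nat),
    (∀ k ∈ ps, pvIsAl copy k = true) →
    ps.foldl (pvScanF copy) (cl, t) = (cl, t ++ ps.filter (pvIsC copy)) := by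
  intro ps
  induction ps with
  | nil => intro cl t _; simp
  | cons i ps ih =>
      intro cl t hall
      have hal : pvIsAl copy i = true := hall i (by simp)
      simp only [List.foldl_cons, pvScanF_eq, if_pos hal]
      by_cases hiv : pvIsV copy i
      · have hic : ¬ pvIsC copy i = true := by simp [pvIsC, hiv]
        rw [if_pos hiv, List.filter_cons_of_neg (by simpa using hic)]
        exact ih cl t (fun k hk => hall k (by simp [hk]))
      · have hic : pvIsC copy i = true := by simp [pvIsC, hal, hiv]
        rw [if_neg hiv, List.filter_cons_of_pos (by simpa using hic)]
        rw [ih cl (t ++ [i]) (fun k hk => hall k (by simp [hk]))]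
        simp

lemma pvHeadDropWhile {p : String → Bool} : ∀ {rest l : List String} {c : String},
    rest.dropWhile p = c :: l → p c = false := by
  intro rest
  induction rest with
  | nil => intro l c h; simp at h
  | cons x xs ih =>
      intro l c h
      rw [List.dropWhile_cons] at h
      split at h
      · exact ih h
      · next hp => cases h; simpa using hp

lemma pvScan_runs (copy : List String) : ∀ (N : Nat) (l : List String), l.length = N →
    ∀ (i : Nat) (cl : List (List Nat)), copy.drop i = l →
    ∃ gs t, (List.range' i l.length).foldl (pvScanF copy) (cl, []) = (cl ++ gs, t) ∧
      gs ++ (if t = [] then [] else [t]) = pvAltRuns copy i l ∧ (∀ g ∈ gs, g ≠ []) := by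
  intro N
  induction N using Nat.strong_induction_on with
  | _ N IH =>
    intro l hlen i cl hdrop
    have hget : ∀ j, copy[i + j]? = l[j]? := by
      intro j; rw [← hdrop, List.getElem?_drop]
    cases l with
    | nil =>
        refine ⟨[], [], by simp, by simp [pvAltRuns], by simp⟩
    | cons c rest =>
        have hc : copy.getD i "" = c := by
          have := hget 0
          simp only [Nat.add_zero] at this
          simp [List.getD_eq_getElem?_getD, this]
        by_cases hal : PySem.Str.strIsalpha c
        · -- alphabetic block
          set blk := rest.takeWhile (fun s => PySem.Str.strIsalpha s) with hblk
          set dw := rest.dropWhile (fun s => PySem.Str.strIsalpha s) with hdw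
          set m := blk.length with hm
          have hsplit : blk ++ dw = rest := List.takeWhile_append_dropWhile
          have hmle : m ≤ rest.length := by
            rw [← hsplit]; simp [hm]
          have hlen2 : (c :: rest).length = (m + 1) + dw.length := by
            simp only [List.length_cons]
            have := congrArg List.length hsplit
            simp at this
            omega
          have hrange : List.range' i ((c :: rest).length) =
              List.range' i (m + 1) ++ List.range' (i + (m + 1)) dw.length := by
            rw [hlen2, List.range'_append_1]
          have halls : ∀ k ∈ List.range' i (m + 1), pvIsAl copy k = true := by
            intro k hk
            rw [List.mem_range'_1] at hk
            obtain ⟨h1, h2⟩ := hk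
            have hj : k = i + (k - i) := by omega
            set j := k - i with hjdef
            have hjm : j ≤ m := by omega
            have hchar : copy[k]? = (c :: rest)[j]? := by rw [hj]; exact hget j
            rcases Nat.eq_zero_or_pos j with hj0 | hjpos
            · rw [hj0] at hchar
              simp only [List.getElem?_cons_zero] at hchar
              simp only [pvIsAl, List.getD_eq_getElem?_getD, hchar, Option.getD_some]
              exact hal
            · have hj1 : (c :: rest)[j]? = rest[j - 1]? := by
                rcases Nat.exists_eq_add_of_lt hjpos with ⟨jj, hjj⟩
                have : j = jj + 1 := by omega
                rw [this]; simp
              have hj2 : rest[j - 1]? = blk[j - 1]? := by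
                rw [← hsplit]
                rw [List.getElem?_append_left (by omega)]
              have hmem : ∃ x, blk[j-1]? = some x ∧ x ∈ blk := by
                have hlt : j - 1 < blk.length := by omega
                exact ⟨blk[j-1], by simp [hlt], List.getElem_mem hlt⟩
              obtain ⟨x, hx1, hx2⟩ := hmem
              have hxal : PySem.Str.strIsalpha x = true := List.mem_takeWhile_imp hx2
              have : copy[k]? = some x := by rw [hchar, hj1, hj2, hx1]
              simp only [pvIsAl, List.getD_eq_getElem?_getD, this, Option.getD_some]
              exact hxal
          -- A's scan over the block
          have hblockfold : (List.range' i (m + 1)).foldl (pvScanF copy) (cl, []) =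
              (cl, (List.range' i (m + 1)).filter (pvIsC copy)) := by
            rw [pvScan_block copy _ cl [] halls]; simp
          set g' := (List.range' i (m + 1)).filter (pvIsC copy) with hg'
          -- Source B's group over the block is the same list
          have hgeq : (List.range' i (m + 1)).filter
              (fun k => !(PySem.Set.contains (PySem.Set.ofList pvV10) (copy.getD k ""))) = g' := by
            rw [hg']
            apply List.filter_congr
            intro k hk
            have := halls k hk
            simp [pvIsC, pvIsV, this]
          have hruns_unfold : pvAltRuns copy i (c :: rest) =
              (if g' = [] then [] else [g']) ++ pvAltRuns copy (i + m + 1) (rest.drop m) := by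
            rw [pvAltRuns]
            simp only [hal, if_pos]
            rw [← hblk, ← hm, hgeq]
          have hdropm : rest.drop m = dw := by
            rw [← hsplit, hm, List.drop_left]
          have hdrop2 : copy.drop (i + m + 2) = dw.drop 1 := by
            have h1 : copy.drop (i + m + 2) = (copy.drop i).drop (m + 2) := by
              rw [List.drop_drop]; ring_nf
            rw [h1, hdrop]
            have : (c :: rest).drop (m + 2) = rest.drop (m + 1) := by simp
            rw [this, ← hdropm, List.drop_drop]
          cases hdwe : dw with
          | nil =>
              refine ⟨[], g', ?_, ?_, by simp⟩
              · rw [hrange, List.foldl_append, hblockfold]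
                simp [hdwe]
              · rw [hruns_unfold, hdropm, hdwe]
                simp [pvAltRuns]
          | cons c' rest'' =>
              have hpc' : PySem.Str.strIsalpha c' = false := pvHeadDropWhile (hdw ▸ hdwe)
              have hcharc' : copy.getD (i + m + 1) "" = c' := by
                have h1 : copy[i + (m+1)]? = (c :: rest)[m+1]? := hget (m+1)
                have h2 : (c :: rest)[m+1]? = rest[m]? := by simp
                have h3 : rest[m]? = dw[0]? := by
                  rw [← hsplit, List.getElem?_append_right (by omega)]
                  simp [hm]
                rw [hdwe] at h3
                simp only [List.getElem?_cons_zero] at h3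
                have : copy[i + m + 1]? = some c' := by
                  have : i + (m + 1) = i + m + 1 := by omega
                  rw [← this, h1, h2, h3]
                simp [List.getD_eq_getElem?_getD, this]
              -- step at the terminating non-alphabetic position
              have hstep : pvScanF copy (cl, g') (i + m + 1) =
                  (cl ++ (if g' = [] then [] else [g']), []) := by
                rw [pvScanF_eq]
                rw [if_neg (by simp only [pvIsAl, hcharc', hpc']; simp)]
                by_cases hge : g' = []
                · rw [if_neg (by simp [hge])]; simp [hge]
                · rw [if_pos (by simp [hge])]; simp [hge]
              set gb := (if g' = [] then [] else [g']) with hgb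
              have hlrest : rest''.length < N := by
                have h1 := congrArg List.length hsplit
                simp [hdwe] at h1
                have h2 : rest.length + 1 = N := by simpa using hlen
                omega
              have hdrop'' : copy.drop (i + m + 2) = rest'' := by
                rw [hdrop2, hdwe]; simp
              obtain ⟨gs', t', hfold', hruns', hne'⟩ :=
                IH rest''.length hlrest rest'' rfl (i + m + 2) (cl ++ gb) hdrop''
              refine ⟨gb ++ gs', t', ?_, ?_, ?_⟩
              · rw [hrange, List.foldl_append, hblockfold]
                rw [hdwe]
                simp only [List.length_cons, List.range'_succ, List.foldl_cons]
                have heq1 : i + (m + 1) = i + m + 1 := by omega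
                rw [heq1, hstep]
                have heq2 : i + m + 1 + 1 = i + m + 2 := by omega
                rw [heq2, hfold']
                rw [List.append_assoc]
              · rw [hruns_unfold, hdropm, hdwe]
                have : pvAltRuns copy (i + m + 1) (c' :: rest'') =
                    pvAltRuns copy (i + m + 2) rest'' := by
                  rw [pvAltRuns]
                  simp only [hpc', Bool.false_eq_true, if_false]
                rw [this, ← hruns']
                rw [List.append_assoc]
              · intro g hg
                rcases List.mem_append.mp hg with hg | hg
                · rw [hgb] at hg
                  split at hg
                  · simp at hg
                  · next hge => simp at hg; rw [hg]; exact hge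
                · exact hne' g hg
        · -- non-alphabetic head: skip
          have hal' : PySem.Str.strIsalpha c = false := by
            revert hal; cases PySem.Str.strIsalpha c <;> simp
          have hstep : pvScanF copy (cl, []) i = (cl, []) := by
            rw [pvScanF_eq]
            rw [if_neg (by simp only [pvIsAl]; rw [hc]; exact hal)]
            simp
          have hdrop1 : copy.drop (i + 1) = rest := by
            have h1 : copy.drop (i + 1) = (copy.drop i).drop 1 := by rw [List.drop_drop]
            rw [h1, hdrop]
            rfl
          have h2 : rest.length + 1 = N := by simpa using hlen
          obtain ⟨gs, t, hfold, hruns, hne⟩ :=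
            IH rest.length (by omega) rest rfl (i + 1) cl hdrop1
          refine ⟨gs, t, ?_, ?_, hne⟩
          · simp only [List.length_cons, List.range'_succ, List.foldl_cons]
            rw [hstep]
            exact hfold
          · rw [pvAltRuns]
            simp only [hal', Bool.false_eq_true, if_false]
            exact hruns

lemma pvZipFlatten (copy : List String) : ∀ (R : List (List Nat)),
    (R.flatten).zip (((R.map pvRot).flatten).map (pvD copy)) =
      R.flatMap (fun g => g.zip ((pvRot g).map (pvD copy))) := by
  intro R
  induction R with
  | nil => rfl
  | cons g R ih =>
      simp only [List.flatten_cons, List.map_cons, List.flatMap_cons, List.map_append]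
      rw [List.zip_append (by simp [pvRot_length]), ih]

lemma pvSc_foldl (w : List Nat → List (Nat × String)) : ∀ (R : List (List Nat)) (m : List String),
    R.foldl (fun m g => pvSc m (w g)) m = pvSc m (R.flatMap w) := by
  intro R
  induction R with
  | nil => intro m; rfl
  | cons g R ih =>
      intro m
      simp only [List.foldl_cons, List.flatMap_cons]
      rw [pvSc_append, ih]

lemma arcA_unfold (msg : List String) (n : Int) :
    arc_v_c msg n =
      PySem.Str.join "" ((List.range msg.length).foldl (pvFinF msg)
        (msg,
         (let vl := (List.range msg.length).foldl
            (fun acc i => if PySem.Set.contains (PySem.Set.ofList pvV10) (msg.getD i "") then acc ++ [i] else acc) [] ;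
          vl.drop (vl.length - 1) ++ vl.take (vl.length - 1)),
         (let scan := (List.range msg.length).foldl (pvScanF msg) ([], []);
          (scan.1 ++ [scan.2]).map (fun g => if g.length > 1 then g.drop 1 ++ g.take 1 else g)))).1 := rfl

lemma arcB_unfold (msg : List String) (n : Int) :
    arc_v_c_alt msg n =
      PySem.Str.join ""
        (let vpos := (List.range msg.length).filter
            (fun i => PySem.Set.contains (PySem.Set.ofList pvV10) (msg.getD i ""));
         let vch := vpos.map (fun p => msg.getD p "");
         let msg1 := pvSc msg (vpos.zip (vch.drop (vch.length - 1) ++ vch.take (vch.length - 1)));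
         (pvAltRuns msg 0 msg).foldl
           (fun m g => let cs := g.map (fun p => msg.getD p ""); pvSc m (g.zip (cs.drop 1 ++ cs.take 1))) msg1) := rfl

theorem arc_v_c_spec : Claim_equal_arc_v_c := by
  intro msg n _hD
  unfold Spec_arc_v_c
  rw [arcA_unfold msg n, arcB_unfold msg n]
  simp only []
  -- the shared vowel test
  have hp : (fun i => PySem.Set.contains (PySem.Set.ofList pvV10) (msg.getD i "")) = pvIsV msg := by
    funext i; rw [pvContains_eq]; rfl
  rw [hp]
  have hAv : (List.range msg.length).foldl
      (fun acc i => if PySem.Set.contains (PySem.Set.ofList pvV10) (msg.getD i "") then acc ++ [i] else acc) []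
      = (List.range msg.length).filter (pvIsV msg) := by
    rw [show (fun (acc : List Nat) (i : Nat) =>
          if PySem.Set.contains (PySem.Set.ofList pvV10) (msg.getD i "") then acc ++ [i] else acc)
        = (fun acc i => if pvIsV msg i then acc ++ [i] else acc) from by
      funext acc i; rw [pvContains_eq]; rfl]
    rw [PySem.List.foldl_append_if_eq_filter (pvIsV msg)]
    simp
  rw [hAv]
  set vpos := (List.range msg.length).filter (pvIsV msg) with hvpos
  set vq := vpos.drop (vpos.length - 1) ++ vpos.take (vpos.length - 1) with hvq
  -- consonant-run scan
  obtain ⟨gs, t, hfold, hruns, hne⟩ :=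
    pvScan_runs msg msg.length msg rfl 0 [] (by simp)
  have hfold' : (List.range msg.length).foldl (pvScanF msg) ([], []) = (gs, t) := by
    rw [List.range_eq_range']
    have := hfold
    simp only [List.nil_append] at this
    exact this
  rw [hfold']
  set R := pvAltRuns msg 0 msg with hR
  -- rotation of the groups is pvRot
  have hrotmap : (fun (g : List Nat) => if g.length > 1 then g.drop 1 ++ g.take 1 else g) = pvRot := by
    funext g; exact pvRot_if g
  rw [hrotmap]
  set Agroups := gs ++ [t] with hAg
  -- flatten facts
  have hflatA : Agroups.flatten = (List.range msg.length).filter (pvIsC msg) := by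
    have := pvScan_flatten msg (List.range msg.length) [] []
    rw [hfold'] at this
    simpa [hAg] using this
  have hflatR : R.flatten = Agroups.flatten := by
    rw [← hruns, hAg]
    by_cases ht : t = [] <;> simp [ht]
  have hflatRotA : ((Agroups.map pvRot).flatten) = ((R.map pvRot).flatten) := by
    rw [← hruns]
    by_cases ht : t = [] <;> simp [ht, hAg, pvRot]
  -- invariants for the final loop
  have hGG : pvGG (Agroups.map pvRot) := pvGG_map_rot (pvGG_append_singleton gs t hne)
  have hlenvq : vq.length = (List.range msg.length).countP (pvIsV msg) := by
    rw [List.countP_eq_length_filter, ← hvpos, hvq]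
    rcases vpos with _ | ⟨a, l⟩
    · simp
    · simp only [List.length_append, List.length_drop, List.length_take, List.length_cons]
      omega
  have hlencl : ((Agroups.map pvRot).flatten).length = (List.range msg.length).countP (pvIsC msg) := by
    rw [pvFlattenRot_len, hflatA, List.countP_eq_length_filter]
  -- A's final loop is the interleaved write sequence
  rw [pvLoopA msg (List.range msg.length) msg vq (Agroups.map pvRot)
      (List.nodup_range) (fun i _ => rfl) hlenvq hGG hlencl]
  -- reorder the writes: vowel writes first, then consonant writes
  have hperm := pvWr_perm msg (List.range msg.length) vq ((Agroups.map pvRot).flatten)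
      hlenvq hlencl
  have hnd : ((pvWr msg (List.range msg.length) vq ((Agroups.map pvRot).flatten)).map Prod.fst).Nodup := by
    rw [pvWr_map_fst]
    exact List.Nodup.filter _ List.nodup_range
  rw [pvSc_perm hperm hnd msg]
  rw [pvSc_append]
  -- the vowel pass coincides
  have hvch : (vpos.map (pvD msg)).drop ((vpos.map (pvD msg)).length - 1) ++
      (vpos.map (pvD msg)).take ((vpos.map (pvD msg)).length - 1) = vq.map (pvD msg) := by
    rw [hvq]
    simp [List.map_drop, List.map_take]
  have hvpart : vpos.zip (vq.map (pvD msg)) =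
      vpos.zip ((vpos.map (fun p => msg.getD p "")).drop ((vpos.map (fun p => msg.getD p "")).length - 1) ++
        (vpos.map (fun p => msg.getD p "")).take ((vpos.map (fun p => msg.getD p "")).length - 1)) := by
    rw [show (fun p => msg.getD p "") = pvD msg from rfl, hvch]
  rw [← hvpart]
  -- the consonant passes coincide
  have hcpart : ((List.range msg.length).filter (pvIsC msg)).zip
        (((Agroups.map pvRot).flatten).map (pvD msg)) =
      R.flatMap (fun g => g.zip ((pvRot g).map (pvD msg))) := by
    rw [← hflatA, ← hflatR, hflatRotA]
    exact pvZipFlatten msg R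
  rw [hcpart]
  -- B's per-group scatter fold
  have hbody : (fun (m : List String) (g : List Nat) =>
      pvSc m (g.zip ((g.map (fun p => msg.getD p "")).drop 1 ++ (g.map (fun p => msg.getD p "")).take 1)))
      = (fun m g => pvSc m (g.zip ((pvRot g).map (pvD msg)))) := by
    funext m g
    rw [show (fun p => msg.getD p "") = pvD msg from rfl]
    simp [pvRot, List.map_take]
  rw [hbody, pvSc_foldl (fun g => g.zip ((pvRot g).map (pvD msg))) R]
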